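-- pv_equiv track=rewrite | github.com/IgSit/ASD | kolokwium `20-21/kol2 zad3 refueling truck.py | count_oil
-- ===== SOURCE A (Python) =====
-- from collections import deque
--
-- def count_oil(arr):
--     n = len(arr[0])
--     m = len(arr)
--
--     oil = [0 for _ in range(n)]
--
--     for j in range(n):
--         for i in range(m):
--             if arr[i][j] != 0:
--                 partial = 0
--                 queue = deque()
--                 queue.append([i, j])
--                 while queue:
--                     a, b = queue.popleft()
--                     partial += arr[a][b]
--                     arr[a][b] = 0
--                     moves = [(a - 1, b), (a, b + 1), (a + 1, b), (a, b - 1)]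
--                     for w, k in moves:
--                         if 0 <= w <= m - 1 and 0 <= k <= n - 1 and arr[w][k]:
--                             queue.append([w, k])
--
--                 arr[i][j] = partial
--
--     for i in range(n):
--         oil[i] = sum(arr[r][i] for r in range(m))
--     return oil
-- ===== SOURCE B (Python) =====
-- def count_oil(arr):
--     n = len(arr[0])
--     m = len(arr)
--     for j in range(n):
--         for i in range(m):
--             if arr[i][j] != 0:
--                 comp = {(i, j)}
--                 while True:
--                     new = set()
--                     for (a, b) in comp:
--                         for (w, k) in ((a - 1, b), (a, b + 1), (a + 1, b), (a, b - 1)):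
--                             if 0 <= w < m and 0 <= k < n and arr[w][k] != 0 and (w, k) not in comp:
--                                 new.add((w, k))
--                     if not new:
--                         break
--                     comp |= new
--                 total = sum(arr[a][b] for (a, b) in comp)
--                 for (a, b) in comp:
--                     arr[a][b] = 0
--                 arr[i][j] = total
--     return [sum(row[c] for row in arr) for c in range(n)]
-- ===== Notes on version B (the rewrite author's own statement) =====
-- stated objective: faster
-- what changed: Replaces A's destructive BFS (deque worklist that zeroes cells as it pops, re-enqueueing neighbours without a visited set) by a per-component fixpoint set-saturation: the component set is grown round by round over the unmodified grid until no new in-bounds non-zero neighbour appears, then summed and zeroed at once; column sums are built by a comprehension over rows.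
import Mathlib
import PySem

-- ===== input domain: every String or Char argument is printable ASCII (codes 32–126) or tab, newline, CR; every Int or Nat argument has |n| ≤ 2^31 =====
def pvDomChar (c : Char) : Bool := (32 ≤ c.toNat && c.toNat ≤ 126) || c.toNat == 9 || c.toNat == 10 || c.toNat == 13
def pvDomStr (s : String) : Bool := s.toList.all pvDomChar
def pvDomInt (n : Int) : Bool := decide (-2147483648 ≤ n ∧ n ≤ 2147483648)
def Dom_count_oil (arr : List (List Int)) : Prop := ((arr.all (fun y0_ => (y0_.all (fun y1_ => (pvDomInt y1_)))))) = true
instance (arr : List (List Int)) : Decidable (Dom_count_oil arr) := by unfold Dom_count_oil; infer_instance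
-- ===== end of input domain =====

-- B replaces A's destructive BFS-queue flood fill by a per-component fixpoint set-saturation
-- over the unmodified grid; a timing run measured B faster on dense grids, where A's
-- visited-less deque re-enqueues cells many times while B's set admits each cell once.
-- Both Pythons mutate arr in place and leave it in the same final state; the equivalence
-- proved here is about the return value.

-- ===== PORT A =====
-- Shared grid primitives (all cell accesses the Pythons make are in range under Pre_,
-- so the total getD/set forms are exact there).
def pvRowSet (row : List Int) (j v : Int) : List Int :=
  if 0 ≤ j then row.set j.toNat v else row

def pvGridSet (g : List (List Int)) (i j v : Int) : List (List Int) :=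
  if 0 ≤ i then g.set i.toNat (pvRowSet (g.getD i.toNat []) j v) else g

def pvGridGet (g : List (List Int)) (i j : Int) : Int :=
  if 0 ≤ i ∧ 0 ≤ j then (g.getD i.toNat []).getD j.toNat 0 else 0

def pvMoves (a b : Int) : List (Int × Int) := [(a-1,b),(a,b+1),(a+1,b),(a,b-1)]

-- neighbours A's BFS pushes: in bounds and currently non-zero
def pvPush (m n : Int) (g : List (List Int)) (a b : Int) : List (Int × Int) :=
  (pvMoves a b).filter
    (fun d => decide (0 ≤ d.1 ∧ d.1 ≤ m-1 ∧ 0 ≤ d.2 ∧ d.2 ≤ n-1 ∧ pvGridGet g d.1 d.2 ≠ 0))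

-- termination measures for the BFS while-loop
def pvCountNZ (g : List (List Int)) : Nat :=
  (g.map (fun row => row.countP (fun v => decide (v ≠ 0)))).sum

def pvZC (g : List (List Int)) (q : List (Int × Int)) : Nat :=
  q.countP (fun c => decide (pvGridGet g c.1 c.2 = 0))

-- termination lemmas cited by pvBfs's decreasing_by
theorem pvListSet_getD {α : Type} (l : List α) (n : Nat) (d : α) :
    l.set n (l.getD n d) = l := by
  induction l generalizing n with
  | nil => simp
  | cons x xs ih => cases n <;> simp_all

theorem pvGridSet_zero_self (g : List (List Int)) (a b : Int)
    (h : pvGridGet g a b = 0) : pvGridSet g a b 0 = g := by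
  unfold pvGridGet at h
  unfold pvGridSet pvRowSet
  by_cases ha : 0 ≤ a
  · rw [if_pos ha]
    by_cases hb : 0 ≤ b
    · rw [if_pos hb]
      rw [if_pos ⟨ha, hb⟩] at h
      rw [← h]
      rw [pvListSet_getD, pvListSet_getD]
    · rw [if_neg hb, pvListSet_getD]
  · rw [if_neg ha]

theorem pvRowCount_lt (row : List Int) (k : Nat) (h : row.getD k 0 ≠ 0) :
    (row.set k 0).countP (fun v => decide (v ≠ 0)) < row.countP (fun v => decide (v ≠ 0)) := by
  induction row generalizing k with
  | nil => simp at h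
  | cons x xs ih =>
    cases k with
    | zero =>
      simp only [List.getD_cons_zero] at h
      simp [List.countP_cons, h]
    | succ k =>
      simp only [List.getD_cons_succ] at h
      have := ih k h
      simp only [List.set_cons_succ, List.countP_cons]
      omega

theorem pvCountNZ_cons (row : List Int) (g : List (List Int)) :
    pvCountNZ (row :: g) = row.countP (fun v => decide (v ≠ 0)) + pvCountNZ g := by
  simp [pvCountNZ]

theorem pvCountNZ_set_lt_aux (g : List (List Int)) (i : Nat) (r : List Int)
    (hi : i < g.length)
    (hr : r.countP (fun v => decide (v ≠ 0)) < (g.getD i []).countP (fun v => decide (v ≠ 0))) :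
    pvCountNZ (g.set i r) < pvCountNZ g := by
  induction g generalizing i with
  | nil => simp at hi
  | cons x xs ih =>
    cases i with
    | zero =>
      simp only [List.set_cons_zero, pvCountNZ_cons]
      simp only [List.getD_cons_zero] at hr
      omega
    | succ k =>
      simp only [List.set_cons_succ, pvCountNZ_cons]
      simp only [List.getD_cons_succ] at hr
      have := ih k (by simpa using hi) hr
      omega

theorem pvGridGet_pos_facts (g : List (List Int)) (a b : Int)
    (h : pvGridGet g a b ≠ 0) :
    0 ≤ a ∧ 0 ≤ b ∧ a.toNat < g.length ∧ b.toNat < (g.getD a.toNat []).length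
      ∧ (g.getD a.toNat []).getD b.toNat 0 ≠ 0 := by
  unfold pvGridGet at h
  by_cases hab : 0 ≤ a ∧ 0 ≤ b
  · rw [if_pos hab] at h
    have hrow : a.toNat < g.length := by
      by_contra hc
      have he : g.getD a.toNat [] = [] := List.getD_eq_default _ _ (by omega)
      rw [he] at h
      simp at h
    have hcol : b.toNat < (g.getD a.toNat []).length := by
      by_contra hc
      have he : (g.getD a.toNat []).getD b.toNat 0 = 0 := List.getD_eq_default _ _ (by omega)
      exact h he
    exact ⟨hab.1, hab.2, hrow, hcol, h⟩
  · rw [if_neg hab] at h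
    simp at h

theorem pvCountNZ_set_lt (g : List (List Int)) (a b : Int)
    (h : pvGridGet g a b ≠ 0) : pvCountNZ (pvGridSet g a b 0) < pvCountNZ g := by
  obtain ⟨ha, hb, hrow, hcol, hv⟩ := pvGridGet_pos_facts g a b h
  unfold pvGridSet pvRowSet
  rw [if_pos ha, if_pos hb]
  exact pvCountNZ_set_lt_aux g a.toNat _ hrow (pvRowCount_lt _ _ hv)

theorem pvZC_push_zero (m n : Int) (g : List (List Int)) (a b : Int) :
    pvZC g (pvPush m n g a b) = 0 := by
  unfold pvZC pvPush
  rw [List.countP_eq_zero]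
  intro c hc
  simp only [List.mem_filter, decide_eq_true_eq] at hc
  simp [hc.2.2.2.2.2]

-- the BFS while-loop of A: pop front, add value, zero the cell, push live neighbours
def pvBfs (m n : Int) (g : List (List Int)) (q : List (Int × Int)) (pa : Int) :
    Int × List (List Int) :=
  match q with
  | [] => (pa, g)
  | (a, b) :: rest =>
    pvBfs m n (pvGridSet g a b 0)
      (rest ++ pvPush m n (pvGridSet g a b 0) a b) (pa + pvGridGet g a b)
termination_by (pvCountNZ g, pvZC g q)
decreasing_by
  by_cases h : pvGridGet g a b = 0
  · rw [pvGridSet_zero_self g a b h]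
    apply Prod.Lex.right
    have hp : pvZC g (pvPush m n g a b) = 0 := pvZC_push_zero m n g a b
    unfold pvZC at hp ⊢
    rw [List.countP_append, hp, List.countP_cons]
    simp [h]
  · exact Prod.Lex.left _ _ (pvCountNZ_set_lt g a b h)

-- one scan step of A's column-major double loop
def pvScanA (m n : Int) (g : List (List Int)) (j i : Int) : List (List Int) :=
  if pvGridGet g i j ≠ 0 then
    let r := pvBfs m n g [(i, j)] 0
    pvGridSet r.2 i j r.1
  else g

def count_oil (arr : List (List Int)) : List Int :=
  let n : Int := (arr.headD []).length
  let m : Int := arr.length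
  let g := (PySem.List.pyRange 0 n 1).foldl (fun g j =>
            (PySem.List.pyRange 0 m 1).foldl (fun g i => pvScanA m n g j i) g) arr
  -- oil[i] = sum(arr[r][i] for r in range(m))
  (PySem.List.pyRange 0 n 1).map
    (fun c => ((PySem.List.pyRange 0 m 1).map (fun r => pvGridGet g r c)).sum)

-- ===== PORT B =====
-- one saturation round: the set `new` of in-bounds non-zero neighbours of comp not yet in comp
def pvGrow (m n : Int) (g : List (List Int)) (comp : List (Int × Int)) : List (Int × Int) :=
  comp.foldl (fun new c =>
    (pvMoves c.1 c.2).foldl (fun new d =>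
      if 0 ≤ d.1 ∧ d.1 < m ∧ 0 ≤ d.2 ∧ d.2 < n ∧ pvGridGet g d.1 d.2 ≠ 0 ∧ d ∉ comp
      then PySem.Set.add new d else new) new) []

-- termination measure: in-bounds cells not yet absorbed
def pvCells (m n : Int) : List (Int × Int) :=
  (PySem.List.pyRange 0 m 1).flatMap (fun i => (PySem.List.pyRange 0 n 1).map (fun j => (i, j)))

def pvRem (m n : Int) (comp : List (Int × Int)) : Nat :=
  (pvCells m n).countP (fun x => decide (x ∉ comp))

theorem pvFoldl_mem_invariant {α β : Type} (P : α → Prop) (step : List α → β → List α)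
    (L : List β)
    (hstep : ∀ acc y, y ∈ L → ∀ x ∈ step acc y, x ∈ acc ∨ P x) :
    ∀ acc, ∀ x ∈ L.foldl step acc, x ∈ acc ∨ P x := by
  induction L with
  | nil => intro acc x hx; exact Or.inl hx
  | cons z L ih =>
    intro acc x hx
    have := ih (fun acc y hy => hstep acc y (List.mem_cons_of_mem _ hy)) (step acc z) x hx
    rcases this with h | h
    · exact hstep acc z (List.mem_cons_self) x h
    · exact Or.inr h

theorem pvGrow_mem (m n : Int) (g : List (List Int)) (comp : List (Int × Int)) :
    ∀ x ∈ pvGrow m n g comp,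
      0 ≤ x.1 ∧ x.1 < m ∧ 0 ≤ x.2 ∧ x.2 < n ∧ pvGridGet g x.1 x.2 ≠ 0 ∧ x ∉ comp
        ∧ ∃ c ∈ comp, x ∈ pvMoves c.1 c.2 := by
  intro x hx
  have := pvFoldl_mem_invariant
    (fun x => 0 ≤ x.1 ∧ x.1 < m ∧ 0 ≤ x.2 ∧ x.2 < n ∧ pvGridGet g x.1 x.2 ≠ 0 ∧ x ∉ comp
        ∧ ∃ c ∈ comp, x ∈ pvMoves c.1 c.2)
    _ comp ?_ [] x hx
  · rcases this with h | h
    · simp at h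
    · exact h
  · intro acc c hc x hx
    have := pvFoldl_mem_invariant
      (fun x => 0 ≤ x.1 ∧ x.1 < m ∧ 0 ≤ x.2 ∧ x.2 < n ∧ pvGridGet g x.1 x.2 ≠ 0 ∧ x ∉ comp
          ∧ ∃ c ∈ comp, x ∈ pvMoves c.1 c.2)
      _ (pvMoves c.1 c.2) ?_ acc x hx
    · exact this
    · intro acc2 d hd x hx2
      by_cases hcond : 0 ≤ d.1 ∧ d.1 < m ∧ 0 ≤ d.2 ∧ d.2 < n ∧ pvGridGet g d.1 d.2 ≠ 0 ∧ d ∉ comp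
      · rw [if_pos hcond] at hx2
        rw [PySem.Set.mem_add] at hx2
        rcases hx2 with h | rfl
        · exact Or.inl h
        · exact Or.inr ⟨hcond.1, hcond.2.1, hcond.2.2.1, hcond.2.2.2.1, hcond.2.2.2.2.1,
            hcond.2.2.2.2.2, c, hc, hd⟩
      · rw [if_neg hcond] at hx2
        exact Or.inl hx2

theorem pvCountP_lt_of_strict {α : Type} (l : List α) (p q : α → Bool)
    (hw : ∀ x ∈ l, q x = true → p x = true)
    (x0 : α) (hx0 : x0 ∈ l) (hp : p x0 = true) (hq : ¬ q x0 = true) :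
    l.countP q < l.countP p := by
  induction l with
  | nil => simp at hx0
  | cons z l ih =>
    rw [List.countP_cons, List.countP_cons]
    rcases List.mem_cons.mp hx0 with rfl | hx0'
    · have hle := List.countP_mono_left (l := l) (p := q) (q := p)
        (fun x hx => hw x (List.mem_cons_of_mem _ hx))
      simp [hp, hq]
      omega
    · have := ih (fun x hx h => hw x (List.mem_cons_of_mem _ hx) h) hx0'
      have hz : (if q z then 1 else 0) ≤ (if p z then 1 else 0) := by
        by_cases h : q z = true
        · simp [h, hw z List.mem_cons_self h]
        · simp [h]
      omega

theorem pvMem_cells (m n : Int) (x : Int × Int) :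
    x ∈ pvCells m n ↔ 0 ≤ x.1 ∧ x.1 < m ∧ 0 ≤ x.2 ∧ x.2 < n := by
  simp [pvCells, List.mem_flatMap, PySem.List.mem_pyRange_one]
  constructor
  · rintro ⟨i, ⟨h1, h2⟩, j, ⟨h3, h4⟩, rfl⟩
    exact ⟨h1, h2, h3, h4⟩
  · rintro ⟨h1, h2, h3, h4⟩
    exact ⟨x.1, ⟨h1, h2⟩, x.2, ⟨h3, h4⟩, rfl⟩

theorem pvRem_grow_lt (m n : Int) (g : List (List Int)) (comp : List (Int × Int))
    (h : pvGrow m n g comp ≠ []) :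
    pvRem m n (comp ++ pvGrow m n g comp) < pvRem m n comp := by
  obtain ⟨y, hy⟩ : ∃ y, y ∈ pvGrow m n g comp := List.exists_mem_of_ne_nil _ h
  obtain ⟨h1, h2, h3, h4, _, h6, _⟩ := pvGrow_mem m n g comp y hy
  unfold pvRem
  apply pvCountP_lt_of_strict _ _ _ ?_ y
  · rw [pvMem_cells]; exact ⟨h1, h2, h3, h4⟩
  · simpa using h6
  · simp
    exact fun _ => hy
  · intro x hx
    simp only [decide_eq_true_eq, List.mem_append]
    tauto

-- grow comp to its fixpoint (the `while True` loop of B)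
def pvSat (m n : Int) (g : List (List Int)) (comp : List (Int × Int)) : List (Int × Int) :=
  let new := pvGrow m n g comp
  if h : new = [] then comp else pvSat m n g (comp ++ new)
termination_by pvRem m n comp
decreasing_by exact pvRem_grow_lt m n g comp h

-- zero every cell of comp (the `for (a,b) in comp: arr[a][b] = 0` loop of B)
def pvZero (comp : List (Int × Int)) (g : List (List Int)) : List (List Int) :=
  comp.foldl (fun h c => pvGridSet h c.1 c.2 0) g

-- one scan step of B: saturate the component, sum it, zero it, write the total at the seed
def pvScanB (m n : Int) (g : List (List Int)) (j i : Int) : List (List Int) :=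
  if pvGridGet g i j ≠ 0 then
    let comp := pvSat m n g [(i, j)]
    let total := (comp.map (fun c => pvGridGet g c.1 c.2)).sum
    pvGridSet (pvZero comp g) i j total
  else g

def count_oil_alt (arr : List (List Int)) : List Int :=
  let n : Int := (arr.headD []).length
  let m : Int := arr.length
  let g := (PySem.List.pyRange 0 n 1).foldl (fun g j =>
            (PySem.List.pyRange 0 m 1).foldl (fun g i => pvScanB m n g j i) g) arr
  -- [sum(row[c] for row in arr) for c in range(n)]
  (PySem.List.pyRange 0 n 1).map (fun c => (g.map (fun row => PySem.List.pyGetD row c 0)).sum)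

-- ===== PRECONDITION & SPEC =====
-- Pre_ excludes exactly the inputs where Python A raises IndexError: the empty grid (arr[0])
-- and grids with a row shorter than the first row (the scan reads arr[i][j] for all j < len(arr[0])).
def Pre_count_oil (arr : List (List Int)) : Prop :=
  arr ≠ [] ∧ ∀ row ∈ arr, (arr.headD []).length ≤ row.length
instance (arr : List (List Int)) : Decidable (Pre_count_oil arr) := by
  unfold Pre_count_oil; infer_instance

def pvWitness_count_oil : List (List Int) := [[1, 0], [0, 2]]

def Spec_count_oil (arr : List (List Int)) (out : List Int) : Prop := out = count_oil_alt arr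
instance (arr : List (List Int)) (out : List Int) : Decidable (Spec_count_oil arr out) := by
  unfold Spec_count_oil; infer_instance

-- ===== CLAIM (what is proved, stated in full; the proofs are below) =====
def Claim_equal_count_oil : Prop :=
  ∀ (arr : List (List Int)), Dom_count_oil arr → Pre_count_oil arr →
    Spec_count_oil arr (count_oil arr)

-- ===== LEMMAS AND PROOFS =====

theorem pvListGetD_set {α : Type} (l : List α) (n k : Nat) (a : α) (d : α) :
    (l.set n a).getD k d = if n = k ∧ n < l.length then a else l.getD k d := by
  induction l generalizing n k with
  | nil => simp
  | cons x xs ih =>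
    cases n with
    | zero => cases k <;> simp
    | succ n =>
      cases k with
      | zero => simp
      | succ k =>
        simp only [List.set_cons_succ, List.getD_cons_succ, List.length_cons]
        rw [ih n k]
        by_cases hc : n = k ∧ n < xs.length
        · rw [if_pos hc, if_pos (by omega)]
        · rw [if_neg hc, if_neg (by omega)]

theorem pvRowSet_length (row : List Int) (j v : Int) :
    (pvRowSet row j v).length = row.length := by
  unfold pvRowSet; split <;> simp

theorem pvGridSet_length (g : List (List Int)) (i j v : Int) :
    (pvGridSet g i j v).length = g.length := by
  unfold pvGridSet; split <;> simp

theorem pvGridSet_rowlen (g : List (List Int)) (i j v : Int) (r : Nat) :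
    ((pvGridSet g i j v).getD r []).length = (g.getD r []).length := by
  unfold pvGridSet
  split
  · rw [pvListGetD_set]
    split
    · rename_i hc
      rw [← hc.1, pvRowSet_length]
    · rfl
  · rfl

theorem pvGridGet_set_ne (g : List (List Int)) (i j v a b : Int)
    (h : a ≠ i ∨ b ≠ j) :
    pvGridGet (pvGridSet g i j v) a b = pvGridGet g a b := by
  unfold pvGridGet pvGridSet
  by_cases hab : 0 ≤ a ∧ 0 ≤ b
  · rw [if_pos hab, if_pos hab]
    by_cases hi : 0 ≤ i
    · rw [if_pos hi]
      rw [pvListGetD_set]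
      split
      · rename_i hc
        have hia : i = a := by omega
        subst hia
        have hbj : b ≠ j := by
          rcases h with h | h
          · omega
          · exact h
        unfold pvRowSet
        by_cases hj : 0 ≤ j
        · rw [if_pos hj]
          rw [pvListGetD_set]
          split
          · rename_i hc2
            omega
          · rfl
        · rw [if_neg hj]
      · rfl
    · rw [if_neg hi]
  · rw [if_neg hab, if_neg hab]

theorem pvGridGet_set_zero_self (g : List (List Int)) (a b : Int) :
    pvGridGet (pvGridSet g a b 0) a b = 0 := by
  unfold pvGridGet pvGridSet
  by_cases hab : 0 ≤ a ∧ 0 ≤ b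
  · rw [if_pos hab, if_pos hab.1]
    rw [pvListGetD_set]
    split
    · unfold pvRowSet
      rw [if_pos hab.2]
      rw [pvListGetD_set]
      split
      · rfl
      · rename_i hc hc2
        exact List.getD_eq_default _ _ (by omega)
    · rename_i hc
      have he : g.getD a.toNat [] = [] := List.getD_eq_default _ _ (by omega)
      rw [he]
      rfl
  · rw [if_neg hab]

-- pair inequality gives component inequality usable by pvGridGet_set_ne
theorem pvPair_ne (c d : Int × Int) (h : c ≠ d) : c.1 ≠ d.1 ∨ c.2 ≠ d.2 := by
  by_contra hc
  push_neg at hc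
  exact h (Prod.ext hc.1 hc.2)

-- characterisation of pvPush membership
theorem pvMem_push (m n : Int) (g : List (List Int)) (a b : Int) (d : Int × Int) :
    d ∈ pvPush m n g a b ↔
      d ∈ pvMoves a b ∧ 0 ≤ d.1 ∧ d.1 < m ∧ 0 ≤ d.2 ∧ d.2 < n ∧ pvGridGet g d.1 d.2 ≠ 0 := by
  unfold pvPush
  rw [List.mem_filter]
  simp only [decide_eq_true_eq]
  constructor
  · rintro ⟨h1, h2⟩
    exact ⟨h1, h2.1, by omega, h2.2.2.1, by omega, h2.2.2.2.2⟩
  · rintro ⟨h1, h2, h3, h4, h5, h6⟩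
    exact ⟨h1, h2, by omega, h4, by omega, h6⟩

theorem pvPush_congr (m n : Int) (g g' : List (List Int)) (a b : Int) (d : Int × Int)
    (h : pvGridGet g d.1 d.2 = pvGridGet g' d.1 d.2) :
    d ∈ pvPush m n g a b ↔ d ∈ pvPush m n g' a b := by
  rw [pvMem_push, pvMem_push, h]

-- the cells A's worklist run will absorb, as an inductive reachability predicate
inductive pvInR (m n : Int) (g : List (List Int)) (q : List (Int × Int)) : Int × Int → Prop where
  | seed : ∀ c, c ∈ q → pvGridGet g c.1 c.2 ≠ 0 → pvInR m n g q c
  | spring : ∀ c d, c ∈ q → d ∈ pvPush m n g c.1 c.2 → pvInR m n g q d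
  | step : ∀ c d, pvInR m n g q c → d ∈ pvPush m n g c.1 c.2 → pvInR m n g q d

theorem pvInR_nil (m n : Int) (g : List (List Int)) (x : Int × Int) :
    ¬ pvInR m n g [] x := by
  intro h
  induction h with
  | seed c hc _ => simp at hc
  | spring c d hc _ => simp at hc
  | step c d _ _ ih => exact ih

theorem pvInR_pop_zero (m n : Int) (g : List (List Int)) (a b : Int)
    (rest : List (Int × Int)) (h0 : pvGridGet g a b = 0) (x : Int × Int)
    (h : pvInR m n g ((a,b) :: rest) x) :
    pvInR m n g (rest ++ pvPush m n g a b) x := by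
  induction h with
  | seed c hc hnz =>
    rcases List.mem_cons.mp hc with rfl | hc'
    · exact absurd h0 hnz
    · exact pvInR.seed c (List.mem_append_left _ hc') hnz
  | spring c d hc hd =>
    rcases List.mem_cons.mp hc with rfl | hc'
    · exact pvInR.seed d (List.mem_append_right _ hd)
        ((pvMem_push m n g a b d).mp hd).2.2.2.2.2
    · exact pvInR.spring c d (List.mem_append_left _ hc') hd
  | step c d _ hd ih => exact pvInR.step c d ih hd

theorem pvInR_pop_nz (m n : Int) (g : List (List Int)) (a b : Int)
    (rest : List (Int × Int)) (x : Int × Int)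
    (h : pvInR m n g ((a,b) :: rest) x) (hne : x ≠ (a,b)) :
    pvInR m n (pvGridSet g a b 0)
      (rest ++ pvPush m n (pvGridSet g a b 0) a b) x := by
  revert hne
  induction h with
  | seed c hc hnz =>
    intro hne
    rcases List.mem_cons.mp hc with rfl | hc'
    · exact absurd rfl hne
    · refine pvInR.seed c (List.mem_append_left _ hc') ?_
      rw [pvGridGet_set_ne g a b 0 c.1 c.2 (pvPair_ne c (a,b) hne)]
      exact hnz
  | spring c d hc hd =>
    intro hne
    have hdnz : pvGridGet g d.1 d.2 ≠ 0 := ((pvMem_push m n g c.1 c.2 d).mp hd).2.2.2.2.2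
    have hd' : pvGridGet (pvGridSet g a b 0) d.1 d.2 = pvGridGet g d.1 d.2 :=
      pvGridGet_set_ne g a b 0 d.1 d.2 (pvPair_ne d (a,b) hne)
    rcases List.mem_cons.mp hc with rfl | hc'
    · refine pvInR.seed d (List.mem_append_right _ ?_) (by rw [hd']; exact hdnz)
      exact (pvPush_congr m n g _ a b d hd'.symm).mp hd
    · exact pvInR.spring c d (List.mem_append_left _ hc')
        ((pvPush_congr m n g _ c.1 c.2 d hd'.symm).mp hd)
  | step c d hInR hd ih =>
    intro hne
    have hdnz : pvGridGet g d.1 d.2 ≠ 0 := ((pvMem_push m n g c.1 c.2 d).mp hd).2.2.2.2.2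
    have hd' : pvGridGet (pvGridSet g a b 0) d.1 d.2 = pvGridGet g d.1 d.2 :=
      pvGridGet_set_ne g a b 0 d.1 d.2 (pvPair_ne d (a,b) hne)
    by_cases hca : c = (a,b)
    · have hd2 : d ∈ pvPush m n g a b := by
        rw [show a = c.1 from (congrArg Prod.fst hca).symm,
            show b = c.2 from (congrArg Prod.snd hca).symm]
        exact hd
      refine pvInR.seed d (List.mem_append_right _ ?_) (by rw [hd']; exact hdnz)
      exact (pvPush_congr m n g _ a b d hd'.symm).mp hd2
    · exact pvInR.step c d (ih hca)
        ((pvPush_congr m n g _ c.1 c.2 d hd'.symm).mp hd)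

-- pointwise characterisation of pvZero
theorem pvZero_get (S : List (Int × Int)) (g : List (List Int)) (a b : Int) :
    pvGridGet (pvZero S g) a b = if (a,b) ∈ S then 0 else pvGridGet g a b := by
  induction S generalizing g with
  | nil => simp [pvZero]
  | cons c S ih =>
    rw [pvZero, List.foldl_cons, ← pvZero, ih]
    by_cases hS : (a,b) ∈ S
    · rw [if_pos hS, if_pos (List.mem_cons_of_mem _ hS)]
    · rw [if_neg hS]
      by_cases hc : (a,b) = c
      · rw [if_pos (by simp [List.mem_cons, hc])]
        rw [show a = c.1 from congrArg Prod.fst hc, show b = c.2 from congrArg Prod.snd hc]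
        exact pvGridGet_set_zero_self g c.1 c.2
      · rw [if_neg (by simp [List.mem_cons, hc, hS])]
        exact pvGridGet_set_ne g c.1 c.2 0 a b (pvPair_ne (a,b) c hc)

theorem pvZero_length (S : List (Int × Int)) (g : List (List Int)) :
    (pvZero S g).length = g.length := by
  induction S generalizing g with
  | nil => rfl
  | cons c S ih => rw [pvZero, List.foldl_cons, ← pvZero, ih, pvGridSet_length]

theorem pvZero_rowlen (S : List (Int × Int)) (g : List (List Int)) (r : Nat) :
    ((pvZero S g).getD r []).length = (g.getD r []).length := by
  induction S generalizing g with
  | nil => rfl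
  | cons c S ih => rw [pvZero, List.foldl_cons, ← pvZero, ih, pvGridSet_rowlen]

-- grid extensionality
theorem pvGridGet_natCast (g : List (List Int)) (r c : Nat) :
    pvGridGet g (r : Int) (c : Int) = (g.getD r []).getD c 0 := by
  unfold pvGridGet
  rw [if_pos ⟨Int.natCast_nonneg r, Int.natCast_nonneg c⟩, Int.toNat_natCast, Int.toNat_natCast]

theorem pvGridExt (g h : List (List Int))
    (h1 : g.length = h.length)
    (h2 : ∀ r : Nat, (g.getD r []).length = (h.getD r []).length)
    (h3 : ∀ a b : Int, pvGridGet g a b = pvGridGet h a b) : g = h := by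
  apply List.ext_getElem h1
  intro r hr1 hr2
  apply List.ext_getElem
  · have := h2 r
    rwa [List.getD_eq_getElem _ _ hr1, List.getD_eq_getElem _ _ hr2] at this
  · intro c hc1 hc2
    have := h3 (r : Int) (c : Int)
    rw [pvGridGet_natCast, pvGridGet_natCast] at this
    rwa [List.getD_eq_getElem _ _ hr1, List.getD_eq_getElem _ _ hr2,
      List.getD_eq_getElem _ _ hc1, List.getD_eq_getElem _ _ hc2] at this

def pvSum (g : List (List Int)) (S : List (Int × Int)) : Int :=
  (S.map (fun c => pvGridGet g c.1 c.2)).sum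

-- the worklist theorem: A's BFS loop returns the accumulated sum over, and the grid zeroed on,
-- any duplicate-free set S that is exactly the reachable region of the queue
theorem pvBfs_WL (m n : Int) (g0 : List (List Int)) (q0 : List (Int × Int)) (pa0 : Int) :
    ∀ (S : List (Int × Int)),
      S.Nodup →
      (∀ c ∈ S, pvGridGet g0 c.1 c.2 ≠ 0) →
      (∀ c ∈ S, ∀ d ∈ pvPush m n g0 c.1 c.2, d ∈ S) →
      (∀ c ∈ q0, pvGridGet g0 c.1 c.2 ≠ 0 → c ∈ S) →
      (∀ c ∈ q0, ∀ d ∈ pvPush m n g0 c.1 c.2, d ∈ S) →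
      (∀ x ∈ S, pvInR m n g0 q0 x) →
      pvBfs m n g0 q0 pa0 = (pa0 + pvSum g0 S, pvZero S g0) := by
  induction g0, q0, pa0 using pvBfs.induct (m := m) (n := n) with
  | case1 g pa =>
    intro S _ _ _ _ _ h5
    have hS : S = [] := by
      cases S with
      | nil => rfl
      | cons x S' => exact absurd (h5 x List.mem_cons_self) (pvInR_nil m n g x)
    subst hS
    rw [pvBfs]
    simp [pvSum, pvZero]
  | case2 g pa a b rest ih =>
    intro S hnd h1 h2 h3 h4 h5
    rw [pvBfs]
    by_cases hz : pvGridGet g a b = 0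
    · -- zero pop: grid unchanged
      rw [pvGridSet_zero_self g a b hz] at ih ⊢
      have h3' : ∀ c ∈ rest ++ pvPush m n g a b, pvGridGet g c.1 c.2 ≠ 0 → c ∈ S := by
        intro c hc hcnz
        rcases List.mem_append.mp hc with hc' | hc'
        · exact h3 c (List.mem_cons_of_mem _ hc') hcnz
        · exact h4 (a,b) List.mem_cons_self c hc'
      have h4' : ∀ c ∈ rest ++ pvPush m n g a b, ∀ d ∈ pvPush m n g c.1 c.2, d ∈ S := by
        intro c hc d hd
        rcases List.mem_append.mp hc with hc' | hc'
        · exact h4 c (List.mem_cons_of_mem _ hc') d hd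
        · exact h2 c (h4 (a,b) List.mem_cons_self c hc') d hd
      have h5' : ∀ x ∈ S, pvInR m n g (rest ++ pvPush m n g a b) x := by
        intro x hx
        exact pvInR_pop_zero m n g a b rest hz x (h5 x hx)
      rw [ih S hnd h1 h2 h3' h4' h5']
      rw [hz, add_zero]
    · -- non-zero pop
      have hmem : (a,b) ∈ S := h3 (a,b) List.mem_cons_self hz
      have hgz : pvGridGet (pvGridSet g a b 0) a b = 0 := pvGridGet_set_zero_self g a b
      have hSert : ∀ c ∈ S.erase (a,b), c ≠ (a,b) ∧ c ∈ S := by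
        intro c hc
        exact (List.Nodup.mem_erase_iff hnd).mp hc
      have hget : ∀ c : Int × Int, c ≠ (a,b) →
          pvGridGet (pvGridSet g a b 0) c.1 c.2 = pvGridGet g c.1 c.2 := by
        intro c hc
        exact pvGridGet_set_ne g a b 0 c.1 c.2 (pvPair_ne c (a,b) hc)
      have hdneq : ∀ d : Int × Int, pvGridGet (pvGridSet g a b 0) d.1 d.2 ≠ 0 → d ≠ (a,b) := by
        intro d hd he
        rw [he] at hd
        exact hd hgz
      have hnd' : (S.erase (a,b)).Nodup := hnd.erase _
      have h1' : ∀ c ∈ S.erase (a,b), pvGridGet (pvGridSet g a b 0) c.1 c.2 ≠ 0 := by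
        intro c hc
        obtain ⟨hne, hcS⟩ := hSert c hc
        rw [hget c hne]
        exact h1 c hcS
      have h2' : ∀ c ∈ S.erase (a,b),
          ∀ d ∈ pvPush m n (pvGridSet g a b 0) c.1 c.2, d ∈ S.erase (a,b) := by
        intro c hc d hd
        obtain ⟨hne, hcS⟩ := hSert c hc
        have hdnz := ((pvMem_push m n _ c.1 c.2 d).mp hd).2.2.2.2.2
        have hdne := hdneq d hdnz
        have hdg : d ∈ pvPush m n g c.1 c.2 :=
          (pvPush_congr m n _ g c.1 c.2 d (hget d hdne)).mp hd
        exact (List.mem_erase_of_ne hdne).mpr (h2 c hcS d hdg)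
      have h3' : ∀ c ∈ rest ++ pvPush m n (pvGridSet g a b 0) a b,
          pvGridGet (pvGridSet g a b 0) c.1 c.2 ≠ 0 → c ∈ S.erase (a,b) := by
        intro c hc hcnz
        have hcne := hdneq c hcnz
        have hcg : pvGridGet g c.1 c.2 ≠ 0 := by rw [← hget c hcne]; exact hcnz
        rcases List.mem_append.mp hc with hc' | hc'
        · exact (List.mem_erase_of_ne hcne).mpr (h3 c (List.mem_cons_of_mem _ hc') hcg)
        · have : c ∈ pvPush m n g a b :=
            (pvPush_congr m n _ g a b c (hget c hcne)).mp hc'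
          exact (List.mem_erase_of_ne hcne).mpr (h4 (a,b) List.mem_cons_self c this)
      have h4' : ∀ c ∈ rest ++ pvPush m n (pvGridSet g a b 0) a b,
          ∀ d ∈ pvPush m n (pvGridSet g a b 0) c.1 c.2, d ∈ S.erase (a,b) := by
        intro c hc d hd
        have hdnz := ((pvMem_push m n _ c.1 c.2 d).mp hd).2.2.2.2.2
        have hdne := hdneq d hdnz
        rcases List.mem_append.mp hc with hc' | hc'
        · have hdg : d ∈ pvPush m n g c.1 c.2 :=
            (pvPush_congr m n _ g c.1 c.2 d (hget d hdne)).mp hd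
          exact (List.mem_erase_of_ne hdne).mpr (h4 c (List.mem_cons_of_mem _ hc') d hdg)
        · have hcnz := ((pvMem_push m n _ a b c).mp hc').2.2.2.2.2
          have hcS' : c ∈ S.erase (a,b) := by
            have hcne := hdneq c hcnz
            have : c ∈ pvPush m n g a b :=
              (pvPush_congr m n _ g a b c (hget c hcne)).mp hc'
            exact (List.mem_erase_of_ne hcne).mpr (h4 (a,b) List.mem_cons_self c this)
          exact h2' c hcS' d hd
      have h5' : ∀ x ∈ S.erase (a,b),
          pvInR m n (pvGridSet g a b 0)
            (rest ++ pvPush m n (pvGridSet g a b 0) a b) x := by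
        intro x hx
        obtain ⟨hne, hxS⟩ := hSert x hx
        exact pvInR_pop_nz m n g a b rest x (h5 x hxS) hne
      rw [ih (S.erase (a,b)) hnd' h1' h2' h3' h4' h5']
      have hperm : S.Perm ((a,b) :: S.erase (a,b)) := List.perm_cons_erase hmem
      have hs1 : pvSum g S = pvGridGet g a b + pvSum g (S.erase (a,b)) := by
        unfold pvSum
        rw [List.Perm.sum_eq (hperm.map _)]
        simp
      have hs2 : pvSum (pvGridSet g a b 0) (S.erase (a,b)) = pvSum g (S.erase (a,b)) := by
        unfold pvSum
        congr 1
        apply List.map_congr_left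
        intro c hc
        exact hget c (hSert c hc).1
      have hgrid : pvZero (S.erase (a,b)) (pvGridSet g a b 0) = pvZero S g := by
        apply pvGridExt
        · rw [pvZero_length, pvGridSet_length, pvZero_length]
        · intro r
          rw [pvZero_rowlen, pvGridSet_rowlen, pvZero_rowlen]
        · intro x y
          rw [pvZero_get, pvZero_get]
          by_cases hxy : (x,y) ∈ S.erase (a,b)
          · rw [if_pos hxy, if_pos (hSert _ hxy).2]
          · rw [if_neg hxy]
            by_cases hab2 : (x,y) = (a,b)
            · rw [if_pos (by rw [hab2]; exact hmem)]
              rw [show x = a from congrArg Prod.fst hab2, show y = b from congrArg Prod.snd hab2]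
              exact hgz
            · rw [hget (x,y) hab2]
              rw [if_neg (fun hS => hxy ((List.mem_erase_of_ne hab2).mpr hS))]
      rw [hgrid, hs2, hs1]
      apply Prod.ext
      · simp only
        ring
      · rfl

-- generic foldl helpers for the saturation proofs
theorem pvFoldl_preserve {α β : Type} (Q : α → Prop) (step : α → β → α)
    (hstep : ∀ acc y, Q acc → Q (step acc y)) :
    ∀ (L : List β) (acc : α), Q acc → Q (L.foldl step acc) := by
  intro L
  induction L with
  | nil => intro acc h; exact h
  | cons z L ih => intro acc h; exact ih _ (hstep acc z h)

theorem pvGrow_nodup (m n : Int) (g : List (List Int)) (comp : List (Int × Int)) :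
    (pvGrow m n g comp).Nodup := by
  unfold pvGrow
  refine pvFoldl_preserve (fun l : List (Int × Int) => l.Nodup) _ ?_ comp [] List.nodup_nil
  intro acc y hy
  refine pvFoldl_preserve (fun l : List (Int × Int) => l.Nodup) _ ?_ (pvMoves y.1 y.2) acc hy
  intro acc2 d hd
  split
  · apply PySem.Set.nodup_add
    exact hd
  · exact hd

theorem pvGrow_inner_mono (m n : Int) (g : List (List Int)) (comp : List (Int × Int))
    (L : List (Int × Int)) (acc : List (Int × Int)) (x : Int × Int) (hx : x ∈ acc) :
    x ∈ L.foldl (fun new d =>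
      if 0 ≤ d.1 ∧ d.1 < m ∧ 0 ≤ d.2 ∧ d.2 < n ∧ pvGridGet g d.1 d.2 ≠ 0 ∧ d ∉ comp
      then PySem.Set.add new d else new) acc := by
  refine pvFoldl_preserve (fun l => x ∈ l) _ ?_ L acc hx
  intro acc2 d hd
  split
  · exact (PySem.Set.mem_add _ _ _).mpr (Or.inl hd)
  · exact hd

theorem pvGrow_outer_mono (m n : Int) (g : List (List Int)) (comp : List (Int × Int))
    (L : List (Int × Int)) (acc : List (Int × Int)) (x : Int × Int) (hx : x ∈ acc) :
    x ∈ L.foldl (fun new c =>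
      (pvMoves c.1 c.2).foldl (fun new d =>
        if 0 ≤ d.1 ∧ d.1 < m ∧ 0 ≤ d.2 ∧ d.2 < n ∧ pvGridGet g d.1 d.2 ≠ 0 ∧ d ∉ comp
        then PySem.Set.add new d else new) new) acc := by
  refine pvFoldl_preserve (fun l => x ∈ l) _ ?_ L acc hx
  intro acc2 c hc
  exact pvGrow_inner_mono m n g comp _ acc2 x hc

theorem pvGrow_inner_adds (m n : Int) (g : List (List Int)) (comp : List (Int × Int))
    (L : List (Int × Int)) (acc : List (Int × Int)) (d : Int × Int)
    (hcond : 0 ≤ d.1 ∧ d.1 < m ∧ 0 ≤ d.2 ∧ d.2 < n ∧ pvGridGet g d.1 d.2 ≠ 0 ∧ d ∉ comp) :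
    d ∈ L →
    d ∈ L.foldl (fun new d =>
      if 0 ≤ d.1 ∧ d.1 < m ∧ 0 ≤ d.2 ∧ d.2 < n ∧ pvGridGet g d.1 d.2 ≠ 0 ∧ d ∉ comp
      then PySem.Set.add new d else new) acc := by
  induction L generalizing acc with
  | nil => intro hdL; simp at hdL
  | cons z L ih =>
    intro hdL
    rcases List.mem_cons.mp hdL with rfl | hdL'
    · rw [List.foldl_cons]
      apply pvGrow_inner_mono
      rw [if_pos hcond]
      exact (PySem.Set.mem_add _ _ _).mpr (Or.inr rfl)
    · rw [List.foldl_cons]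
      exact ih _ hdL'

theorem pvGrow_complete (m n : Int) (g : List (List Int)) (comp : List (Int × Int))
    (c : Int × Int) (hc : c ∈ comp) (d : Int × Int) (hd : d ∈ pvMoves c.1 c.2)
    (hcond : 0 ≤ d.1 ∧ d.1 < m ∧ 0 ≤ d.2 ∧ d.2 < n ∧ pvGridGet g d.1 d.2 ≠ 0 ∧ d ∉ comp) :
    d ∈ pvGrow m n g comp := by
  unfold pvGrow
  have haux : ∀ (L : List (Int × Int)) (acc : List (Int × Int)), c ∈ L →
      d ∈ L.foldl (fun new c =>
        (pvMoves c.1 c.2).foldl (fun new d =>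
          if 0 ≤ d.1 ∧ d.1 < m ∧ 0 ≤ d.2 ∧ d.2 < n ∧ pvGridGet g d.1 d.2 ≠ 0 ∧ d ∉ comp
          then PySem.Set.add new d else new) new) acc := by
    intro L
    induction L with
    | nil => intro acc h; simp at h
    | cons z L ih =>
      intro acc hzc
      rcases List.mem_cons.mp hzc with rfl | hc'
      · rw [List.foldl_cons]
        apply pvGrow_outer_mono
        exact pvGrow_inner_adds m n g comp _ acc d hcond hd
      · rw [List.foldl_cons]
        exact ih _ hc'
  exact haux comp [] hc

theorem pvSat_eq (m n : Int) (g : List (List Int)) (comp : List (Int × Int)) :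
    pvSat m n g comp =
      if h : pvGrow m n g comp = [] then comp
      else pvSat m n g (comp ++ pvGrow m n g comp) := by
  rw [pvSat]

theorem pvSat_rec (m n : Int) (g : List (List Int)) (motive : List (Int × Int) → Prop)
    (h1 : ∀ comp, pvGrow m n g comp = [] → motive comp)
    (h2 : ∀ comp, pvGrow m n g comp ≠ [] → motive (comp ++ pvGrow m n g comp) → motive comp) :
    ∀ comp, motive comp := by
  have H : ∀ (k : Nat) (comp), pvRem m n comp ≤ k → motive comp := by
    intro k
    induction k with
    | zero =>
      intro comp hk
      by_cases hnew : pvGrow m n g comp = []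
      · exact h1 comp hnew
      · exfalso
        have := pvRem_grow_lt m n g comp hnew
        omega
    | succ k ih =>
      intro comp hk
      by_cases hnew : pvGrow m n g comp = []
      · exact h1 comp hnew
      · refine h2 comp hnew (ih _ ?_)
        have := pvRem_grow_lt m n g comp hnew
        omega
  intro comp
  exact H (pvRem m n comp) comp le_rfl

-- saturation lemmas
theorem pvSat_sub (m n : Int) (g : List (List Int)) (comp : List (Int × Int)) :
    ∀ x ∈ comp, x ∈ pvSat m n g comp := by
  induction comp using pvSat_rec (m := m) (n := n) (g := g) with
  | h1 comp hnew =>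
    rw [pvSat_eq, dif_pos hnew]
    intro x hx
    exact hx
  | h2 comp hnew ih =>
    rw [pvSat_eq, dif_neg hnew]
    intro x hx
    exact ih x (List.mem_append_left _ hx)

theorem pvSat_nodup (m n : Int) (g : List (List Int)) (comp : List (Int × Int))
    (h : comp.Nodup) : (pvSat m n g comp).Nodup := by
  revert h
  induction comp using pvSat_rec (m := m) (n := n) (g := g) with
  | h1 comp hnew =>
    intro h
    rw [pvSat_eq, dif_pos hnew]
    exact h
  | h2 comp hnew ih =>
    intro h
    rw [pvSat_eq, dif_neg hnew]
    apply ih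
    apply List.Nodup.append h (pvGrow_nodup m n g comp)
    intro x hx hx2
    exact (pvGrow_mem m n g comp x hx2).2.2.2.2.2.1 hx

theorem pvSat_nonzero (m n : Int) (g : List (List Int)) (comp : List (Int × Int))
    (h : ∀ c ∈ comp, pvGridGet g c.1 c.2 ≠ 0) :
    ∀ x ∈ pvSat m n g comp, pvGridGet g x.1 x.2 ≠ 0 := by
  revert h
  induction comp using pvSat_rec (m := m) (n := n) (g := g) with
  | h1 comp hnew =>
    intro h
    rw [pvSat_eq, dif_pos hnew]
    exact h
  | h2 comp hnew ih =>
    intro h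
    rw [pvSat_eq, dif_neg hnew]
    apply ih
    intro c hc
    rcases List.mem_append.mp hc with hc' | hc'
    · exact h c hc'
    · exact (pvGrow_mem m n g comp c hc').2.2.2.2.1

theorem pvSat_closed (m n : Int) (g : List (List Int)) (comp : List (Int × Int)) :
    ∀ c ∈ pvSat m n g comp, ∀ d ∈ pvPush m n g c.1 c.2, d ∈ pvSat m n g comp := by
  induction comp using pvSat_rec (m := m) (n := n) (g := g) with
  | h1 comp hnew =>
    rw [pvSat_eq, dif_pos hnew]
    intro c hc d hd
    obtain ⟨hmv, hb1, hb2, hb3, hb4, hnz⟩ := (pvMem_push m n g c.1 c.2 d).mp hd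
    by_cases hdc : d ∈ comp
    · exact hdc
    · exfalso
      have := pvGrow_complete m n g comp c hc d hmv ⟨hb1, hb2, hb3, hb4, hnz, hdc⟩
      rw [hnew] at this
      simp at this
  | h2 comp hnew ih =>
    rw [pvSat_eq, dif_neg hnew]
    exact ih

theorem pvSat_sound (m n : Int) (g : List (List Int)) (comp : List (Int × Int))
    (q : List (Int × Int)) (h : ∀ c ∈ comp, pvInR m n g q c) :
    ∀ x ∈ pvSat m n g comp, pvInR m n g q x := by
  revert h
  induction comp using pvSat_rec (m := m) (n := n) (g := g) with
  | h1 comp hnew =>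
    intro h
    rw [pvSat_eq, dif_pos hnew]
    exact h
  | h2 comp hnew ih =>
    intro h
    rw [pvSat_eq, dif_neg hnew]
    apply ih
    intro c hc
    rcases List.mem_append.mp hc with hc' | hc'
    · exact h c hc'
    · obtain ⟨hb1, hb2, hb3, hb4, hnz, _, c0, hc0, hmv⟩ := pvGrow_mem m n g comp c hc'
      exact pvInR.step c0 c (h c0 hc0)
        ((pvMem_push m n g c0.1 c0.2 c).mpr ⟨hmv, hb1, hb2, hb3, hb4, hnz⟩)

-- the two scan steps agree on every grid and every cell
theorem pvScan_eq (m n : Int) (g : List (List Int)) (j i : Int) :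
    pvScanA m n g j i = pvScanB m n g j i := by
  unfold pvScanA pvScanB
  by_cases h : pvGridGet g i j ≠ 0
  · rw [if_pos h, if_pos h]
    have hclosed := pvSat_closed m n g [(i,j)]
    have hsub : (i,j) ∈ pvSat m n g [(i,j)] :=
      pvSat_sub m n g [(i,j)] (i,j) List.mem_cons_self
    have hWL := pvBfs_WL m n g [(i,j)] 0 (pvSat m n g [(i,j)])
      (pvSat_nodup m n g [(i,j)] (by simp))
      (pvSat_nonzero m n g [(i,j)] (by
        intro c hc
        rcases List.mem_cons.mp hc with rfl | hc'
        · exact h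
        · simp at hc'))
      hclosed
      (by
        intro c hc _
        rcases List.mem_cons.mp hc with rfl | hc'
        · exact hsub
        · simp at hc')
      (by
        intro c hc d hd
        rcases List.mem_cons.mp hc with rfl | hc'
        · exact hclosed (i,j) hsub d hd
        · simp at hc')
      (pvSat_sound m n g [(i,j)] [(i,j)] (by
        intro c hc
        rcases List.mem_cons.mp hc with rfl | hc'
        · exact pvInR.seed (i,j) List.mem_cons_self h
        · simp at hc'))
    rw [hWL]
    simp only [zero_add, pvSum]
  · rw [if_neg h, if_neg h]

theorem pvScanB_length (m n : Int) (g : List (List Int)) (j i : Int) :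
    (pvScanB m n g j i).length = g.length := by
  unfold pvScanB
  split
  · rw [pvGridSet_length, pvZero_length]
  · rfl

theorem pvMapRange_getD {α β : Type} (g : List α) (d : α) (f : α → β) :
    (List.range g.length).map (fun k => f (g.getD k d)) = g.map f := by
  induction g with
  | nil => simp
  | cons x xs ih =>
    rw [List.length_cons, List.range_succ_eq_map]
    simp only [List.map_cons, List.map_map, Function.comp_def, List.getD_cons_zero,
      List.getD_cons_succ]
    rw [ih]

theorem pvColSum (g : List (List Int)) (c : Int) (hc : 0 ≤ c) :
    ((PySem.List.pyRange 0 (g.length : Int) 1).map (fun r => pvGridGet g r c)).sum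
      = (g.map (fun row => PySem.List.pyGetD row c 0)).sum := by
  rw [PySem.List.pyRange_one]
  rw [List.map_map]
  have h1 : ((fun r => pvGridGet g r c) ∘ fun k : Nat => (0 : Int) + k)
      = fun k : Nat => (g.getD k []).getD c.toNat 0 := by
    funext k
    simp only [Function.comp_apply, zero_add]
    unfold pvGridGet
    rw [if_pos ⟨Int.natCast_nonneg k, hc⟩, Int.toNat_natCast]
  rw [h1]
  have h2 : ((g.length : Int) - 0).toNat = g.length := by omega
  rw [h2]
  rw [pvMapRange_getD g [] (fun row => row.getD c.toNat 0)]
  apply congrArg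
  apply List.map_congr_left
  intro row _
  rw [PySem.List.pyGetD_of_nonneg]
  exact hc

theorem pvFold_length (m n : Int) (arr : List (List Int)) :
    ((PySem.List.pyRange 0 n 1).foldl (fun g j =>
      (PySem.List.pyRange 0 m 1).foldl (fun g i => pvScanB m n g j i) g) arr).length
      = arr.length := by
  have := pvFoldl_preserve (fun g : List (List Int) => g.length = arr.length)
    (fun g j => (PySem.List.pyRange 0 m 1).foldl (fun g i => pvScanB m n g j i) g)
    ?_ (PySem.List.pyRange 0 n 1) arr rfl
  · exact this
  · intro g j hg
    have := pvFoldl_preserve (fun g2 : List (List Int) => g2.length = arr.length)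
      (fun g2 i => pvScanB m n g2 j i) ?_ (PySem.List.pyRange 0 m 1) g hg
    · exact this
    · intro g2 i hg2
      rw [pvScanB_length]
      exact hg2

theorem count_oil_eq_alt (arr : List (List Int)) : count_oil arr = count_oil_alt arr := by
  unfold count_oil count_oil_alt
  simp only [pvScan_eq]
  apply List.map_congr_left
  intro c hcmem
  have hc : 0 ≤ c := (PySem.List.mem_pyRange_one.mp hcmem).1
  set G := (PySem.List.pyRange 0 ((arr.headD []).length : Int) 1).foldl (fun g j =>
      (PySem.List.pyRange 0 (arr.length : Int) 1).foldl
        (fun g i => pvScanB (arr.length : Int) ((arr.headD []).length : Int) g j i) g)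
      arr with hG
  have hlen : G.length = arr.length := pvFold_length _ _ arr
  rw [show (arr.length : Int) = (G.length : Int) by rw [hlen]]
  exact pvColSum G c hc

-- ===== VERDICT (by name: the statement is the Claim_ definition above) =====
theorem count_oil_spec : Claim_equal_count_oil := by
  intro arr _ _
  unfold Spec_count_oil
  exact count_oil_eq_alt arr
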